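-- pv_equiv track=rewrite | github.com/GrayGhostDev/nomics_edu_AI | game_transformer.py | calculate_difficulty
-- ===== SOURCE A (Python) =====
-- def calculate_difficulty(content: str) -> int:
--     """Calculate difficulty level based on content complexity."""
--     # Basic difficulty calculation based on keywords
--     difficulty_keywords = {
--         'basic': 1, 'simple': 1, 'elementary': 1,
--         'intermediate': 2, 'advanced': 3, 'complex': 3,
--         'multiplication': 2, 'division': 2,
--         'algebra': 3, 'calculus': 3
--     }
--
--     content_lower = content.lower()
--     max_difficulty = 1
--
--     for keyword, level in difficulty_keywords.items():
--         if keyword in content_lower: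
--             max_difficulty = max(max_difficulty, level)
--
--     return max_difficulty
-- ===== SOURCE B (Python) =====
-- def calculate_difficulty(content: str) -> int:
--     """Calculate difficulty level based on content complexity."""
--     level_keywords = {
--         3: ['advanced', 'complex', 'algebra', 'calculus'],
--         2: ['intermediate', 'multiplication', 'division'],
--         1: ['basic', 'simple', 'elementary'],
--     }
--     content_lower = content.lower()
--     for level, keywords in level_keywords.items():
--         if any(kw in content_lower for kw in keywords):
--             return level
--     return 1
-- ===== Notes on version B (the rewrite author's own statement) =====
-- stated objective: alternative
-- what changed: Regrouped the keyword table by difficulty level and replaced the scan-all-keywords max-accumulation with a descending scan over levels that returns the first level whose keyword list has a match (default 1).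
import Mathlib
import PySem

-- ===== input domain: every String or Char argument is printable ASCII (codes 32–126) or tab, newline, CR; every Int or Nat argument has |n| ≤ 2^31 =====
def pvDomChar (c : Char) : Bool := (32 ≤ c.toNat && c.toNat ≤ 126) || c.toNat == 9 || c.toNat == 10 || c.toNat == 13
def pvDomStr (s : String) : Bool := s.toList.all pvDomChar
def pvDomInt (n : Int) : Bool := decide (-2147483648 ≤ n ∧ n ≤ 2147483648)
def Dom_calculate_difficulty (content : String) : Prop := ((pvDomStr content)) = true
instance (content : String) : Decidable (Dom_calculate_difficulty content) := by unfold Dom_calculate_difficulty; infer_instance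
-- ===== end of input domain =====

-- B regroups the keyword table by level and returns the first (highest) level with a matching keyword; alternative decomposition, same cost.

-- ===== PORT A =====
def calculate_difficulty (content : String) : Int :=
  let difficulty_keywords : List (String × Int) :=
    [("basic", 1), ("simple", 1), ("elementary", 1),
     ("intermediate", 2), ("advanced", 3), ("complex", 3),
     ("multiplication", 2), ("division", 2),
     ("algebra", 3), ("calculus", 3)]
  let content_lower := PySem.Str.lower content
  difficulty_keywords.foldl
    (fun max_difficulty p =>
      if PySem.Str.isIn p.1 content_lower then max max_difficulty p.2 else max_difficulty)
    1

-- ===== PORT B =====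
def pvScanLevels (content_lower : String) : List (Int × List String) → Int
  | [] => 1
  | (level, kws) :: rest =>
      if kws.any (fun kw => PySem.Str.isIn kw content_lower) then level
      else pvScanLevels content_lower rest

def calculate_difficulty_alt (content : String) : Int :=
  let level_keywords : List (Int × List String) :=
    [(3, ["advanced", "complex", "algebra", "calculus"]),
     (2, ["intermediate", "multiplication", "division"]),
     (1, ["basic", "simple", "elementary"])]
  pvScanLevels (PySem.Str.lower content) level_keywords

-- ===== PRECONDITION & SPEC =====
def Spec_calculate_difficulty (content : String) (out : Int) : Prop := out = calculate_difficulty_alt content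
instance (content : String) (out : Int) : Decidable (Spec_calculate_difficulty content out) := by unfold Spec_calculate_difficulty; infer_instance

-- ===== CLAIM (what is proved, stated in full; the proofs are below) =====
def Claim_equal_calculate_difficulty : Prop := ∀ (content : String), Dom_calculate_difficulty content → Spec_calculate_difficulty content (calculate_difficulty content)

-- ===== LEMMAS AND PROOFS =====

-- Both ports reduce to finite tables over the ten membership booleans.
def pvFoldTable (bs : List (Bool × Int)) : Int :=
  bs.foldl (fun m p => if p.1 then max m p.2 else m) 1

def pvScanTable : List (Int × List Bool) → Int
  | [] => 1
  | (level, bs) :: rest => if bs.any id then level else pvScanTable rest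

theorem pvTable_eq : ∀ (b1 b2 b3 b4 b5 b6 b7 b8 b9 b10 : Bool),
    pvFoldTable [(b1, 1), (b2, 1), (b3, 1), (b4, 2), (b5, 3), (b6, 3), (b7, 2), (b8, 2), (b9, 3), (b10, 3)]
      = pvScanTable [(3, [b5, b6, b9, b10]), (2, [b4, b7, b8]), (1, [b1, b2, b3])] := by
  decide

set_option maxHeartbeats 1000000 in
theorem pvA_eq_foldTable (content : String) :
    calculate_difficulty content
      = pvFoldTable
          [(PySem.Str.isIn "basic" (PySem.Str.lower content), 1),
           (PySem.Str.isIn "simple" (PySem.Str.lower content), 1),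
           (PySem.Str.isIn "elementary" (PySem.Str.lower content), 1),
           (PySem.Str.isIn "intermediate" (PySem.Str.lower content), 2),
           (PySem.Str.isIn "advanced" (PySem.Str.lower content), 3),
           (PySem.Str.isIn "complex" (PySem.Str.lower content), 3),
           (PySem.Str.isIn "multiplication" (PySem.Str.lower content), 2),
           (PySem.Str.isIn "division" (PySem.Str.lower content), 2),
           (PySem.Str.isIn "algebra" (PySem.Str.lower content), 3),
           (PySem.Str.isIn "calculus" (PySem.Str.lower content), 3)] := by
  simp only [calculate_difficulty, pvFoldTable, List.foldl]

theorem pvB_eq_scanTable (content : String) :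
    calculate_difficulty_alt content
      = pvScanTable
          [(3, [PySem.Str.isIn "advanced" (PySem.Str.lower content),
                PySem.Str.isIn "complex" (PySem.Str.lower content),
                PySem.Str.isIn "algebra" (PySem.Str.lower content),
                PySem.Str.isIn "calculus" (PySem.Str.lower content)]),
           (2, [PySem.Str.isIn "intermediate" (PySem.Str.lower content),
                PySem.Str.isIn "multiplication" (PySem.Str.lower content),
                PySem.Str.isIn "division" (PySem.Str.lower content)]),
           (1, [PySem.Str.isIn "basic" (PySem.Str.lower content),
                PySem.Str.isIn "simple" (PySem.Str.lower content),
                PySem.Str.isIn "elementary" (PySem.Str.lower content)])] := by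
  simp only [calculate_difficulty_alt, pvScanLevels, pvScanTable, List.any, id]

-- ===== VERDICT (by name: the statement is the Claim_ definition above) =====
theorem calculate_difficulty_spec : Claim_equal_calculate_difficulty := by
  intro content _
  unfold Spec_calculate_difficulty
  rw [pvA_eq_foldTable, pvB_eq_scanTable]
  exact pvTable_eq _ _ _ _ _ _ _ _ _ _
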